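-- pv_equiv track=rewrite | github.com/Alteztyn/TBA---Assignment | tbas_.py | isSubjek
-- ===== SOURCE A (Python) =====
-- def isSubjek(word: str) -> bool:
--     # Subjek = {'aku', 'anda', 'kamu', 'dia', 'saya'}
--     current_State_Q = 0
--     for letter in word:
--         match current_State_Q:
--             case -1: break
--             case 0:
--                 if letter == 'a': current_State_Q = 1
--                 elif letter == 'k': current_State_Q = 2
--                 elif letter == 'd': current_State_Q = 3
--                 elif letter == 's': current_State_Q = 4
--                 else: current_State_Q = -1
--             case 1:
--                 if letter == 'n': current_State_Q = 5
--                 elif letter == 'k': current_State_Q = 6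
--                 else: current_State_Q = -1
--             case 2: current_State_Q = 7 if letter == 'a' else -1
--             case 3: current_State_Q = 8 if letter == 'i' else -1
--             case 4: current_State_Q = 9 if letter == 'a' else -1
--             case 5: current_State_Q = 8 if letter == 'd' else -1
--             case 6: current_State_Q = 10 if letter == 'u' else -1
--             case 7: current_State_Q = 11 if letter == 'm' else -1
--             case 8: current_State_Q = 12 if letter == 'a' else -1
--             case 9: current_State_Q = 8 if letter == 'y' else -1
--             case 10: current_State_Q = 10 if letter == ' ' else -1 #final state
--             case 11: current_State_Q = 10 if letter == 'u' else -1
--             case 12: current_State_Q = 12 if letter == ' ' else -1 #final state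
--
--     return current_State_Q == 10 or current_State_Q == 12
-- ===== SOURCE B (Python) =====
-- _SUBJEK = {'aku', 'anda', 'kamu', 'dia', 'saya'}
--
-- def isSubjek(word: str) -> bool:
--     return word.rstrip(' ') in _SUBJEK
-- ===== Notes on version B (the rewrite author's own statement) =====
-- stated objective: simpler
-- what changed: Replaces the character-by-character 13-state DFA with one strip of trailing spaces plus a membership test in the literal set of the five pronouns.
import Mathlib
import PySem

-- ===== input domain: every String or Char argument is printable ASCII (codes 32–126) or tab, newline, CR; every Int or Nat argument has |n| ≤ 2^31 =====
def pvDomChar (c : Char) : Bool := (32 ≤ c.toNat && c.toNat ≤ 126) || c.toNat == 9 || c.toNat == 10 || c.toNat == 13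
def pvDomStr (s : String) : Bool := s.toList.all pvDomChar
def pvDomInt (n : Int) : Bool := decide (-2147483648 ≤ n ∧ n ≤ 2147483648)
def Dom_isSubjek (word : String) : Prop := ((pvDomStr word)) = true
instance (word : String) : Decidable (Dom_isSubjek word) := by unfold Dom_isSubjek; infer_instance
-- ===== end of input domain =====

-- B replaces A's 13-state character DFA by stripping trailing spaces and one membership test
-- in the literal five-pronoun set (objective: simpler).

-- ===== PORT A =====

-- one step of A's match statement (states ≥ 0; state -1 `break`s and is handled in the loop)
def isSubjekStep (q : Int) (letter : Char) : Int :=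
  if q = 0 then
    if letter = 'a' then 1 else if letter = 'k' then 2
    else if letter = 'd' then 3 else if letter = 's' then 4 else -1
  else if q = 1 then
    if letter = 'n' then 5 else if letter = 'k' then 6 else -1
  else if q = 2 then (if letter = 'a' then 7 else -1)
  else if q = 3 then (if letter = 'i' then 8 else -1)
  else if q = 4 then (if letter = 'a' then 9 else -1)
  else if q = 5 then (if letter = 'd' then 8 else -1)
  else if q = 6 then (if letter = 'u' then 10 else -1)
  else if q = 7 then (if letter = 'm' then 11 else -1)
  else if q = 8 then (if letter = 'a' then 12 else -1)
  else if q = 9 then (if letter = 'y' then 8 else -1)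
  else if q = 10 then (if letter = ' ' then 10 else -1)
  else if q = 11 then (if letter = 'u' then 10 else -1)
  else if q = 12 then (if letter = ' ' then 12 else -1)
  else q

-- A's `for` loop, with the `case -1: break` as an early exit
def isSubjekLoop (q : Int) : List Char → Int
  | [] => q
  | c :: cs => if q = -1 then q else isSubjekLoop (isSubjekStep q c) cs

def isSubjek (word : String) : Bool :=
  let q := isSubjekLoop 0 word.toList
  q == 10 || q == 12

-- ===== PORT B =====

-- word.rstrip(' '): drop the trailing run of spaces (exact: Python's rstrip with an explicit
-- char argument strips that char from the right only; ported by hand, PySem has no rstripChars)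
def rstripSpaces (l : List Char) : List Char :=
  (l.reverse.dropWhile (· = ' ')).reverse

def isSubjekWords : List (List Char) :=
  [['a','k','u'], ['a','n','d','a'], ['k','a','m','u'], ['d','i','a'], ['s','a','y','a']]

def isSubjek_alt (word : String) : Bool :=
  decide (rstripSpaces word.toList ∈ isSubjekWords)

-- ===== PRECONDITION & SPEC =====
def Spec_isSubjek (word : String) (out : Bool) : Prop := out = isSubjek_alt word
instance (word : String) (out : Bool) : Decidable (Spec_isSubjek word out) := by unfold Spec_isSubjek; infer_instance

-- ===== CLAIM (what is proved, stated in full; the proofs are below) =====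
def Claim_equal_isSubjek : Prop := ∀ (word : String), Dom_isSubjek word → Spec_isSubjek word (isSubjek word)

-- ===== LEMMAS AND PROOFS =====

set_option maxHeartbeats 1000000

-- rstripSpaces, recast as a recursion from the front
def rstripF : List Char → List Char
  | [] => []
  | c :: cs => if c = ' ' ∧ rstripF cs = [] then [] else c :: rstripF cs

theorem rstripF_eq (l : List Char) : rstripF l = rstripSpaces l := by
  induction l with
  | nil => rfl
  | cons c cs ih =>
    unfold rstripSpaces at *
    rw [rstripF, List.reverse_cons, List.dropWhile_append, ih]
    by_cases h : cs.reverse.dropWhile (· = ' ') = []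
    · by_cases hc : c = ' ' <;> simp [h, hc]
    · have hne : (cs.reverse.dropWhile (· = ' ')).reverse ≠ [] := by simpa using h
      simp [h, hne]

-- the finite language accepted from each state of A
def langOf (q : Int) : List (List Char) :=
  if q = 0 then isSubjekWords
  else if q = 1 then [['n','d','a'], ['k','u']]
  else if q = 2 then [['a','m','u']]
  else if q = 3 then [['i','a']]
  else if q = 4 then [['a','y','a']]
  else if q = 5 then [['d','a']]
  else if q = 6 then [['u']]
  else if q = 7 then [['m','u']]
  else if q = 8 then [['a']]
  else if q = 9 then [['y','a']]
  else if q = 10 then [[]]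
  else if q = 11 then [['u']]
  else if q = 12 then [[]]
  else []

def stateList : List Int := [-1, 0, 1, 2, 3, 4, 5, 6, 7, 8, 9, 10, 11, 12]

theorem step_mem (q : Int) (c : Char) (hq : q ∈ stateList) : isSubjekStep q c ∈ stateList := by
  simp only [stateList, List.mem_cons, List.not_mem_nil, or_false] at hq
  rcases hq with rfl|rfl|rfl|rfl|rfl|rfl|rfl|rfl|rfl|rfl|rfl|rfl|rfl|rfl <;>
    first
      | (norm_num [isSubjekStep]; split_ifs <;> decide)
      | (norm_num [isSubjekStep]; decide)

-- the key transition property: consuming one non-trailing character c moves the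
-- residual language along the DFA step
theorem lang_step (q : Int) (hq : q ∈ stateList) (c : Char) (r : List Char)
    (h : ¬ (c = ' ' ∧ r = [])) :
    (c :: r ∈ langOf q ↔ r ∈ langOf (isSubjekStep q c)) := by
  simp only [stateList, List.mem_cons, List.not_mem_nil, or_false] at hq
  rcases hq with rfl|rfl|rfl|rfl|rfl|rfl|rfl|rfl|rfl|rfl|rfl|rfl|rfl|rfl <;>
    first
      | (norm_num [isSubjekStep, langOf]; done)
      | (norm_num [isSubjekStep]; split_ifs <;> norm_num [langOf, isSubjekWords] <;> simp_all <;> tauto)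

theorem lang_space (q : Int) (hq : q ∈ stateList) :
    ([] ∈ langOf q ↔ [] ∈ langOf (isSubjekStep q ' ')) := by
  simp only [stateList, List.mem_cons, List.not_mem_nil, or_false] at hq
  rcases hq with rfl|rfl|rfl|rfl|rfl|rfl|rfl|rfl|rfl|rfl|rfl|rfl|rfl|rfl <;> decide

theorem loop_lang (l : List Char) (q : Int) (hq : q ∈ stateList) :
    (isSubjekLoop q l = 10 ∨ isSubjekLoop q l = 12) ↔ rstripF l ∈ langOf q := by
  induction l generalizing q with
  | nil =>
    simp only [isSubjekLoop, rstripF]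
    simp only [stateList, List.mem_cons, List.not_mem_nil, or_false] at hq
    rcases hq with rfl|rfl|rfl|rfl|rfl|rfl|rfl|rfl|rfl|rfl|rfl|rfl|rfl|rfl <;>
      simp [langOf, isSubjekWords]
  | cons c cs ih =>
    by_cases hneg : q = -1
    · subst hneg
      simp only [isSubjekLoop, langOf]
      norm_num
    · rw [show isSubjekLoop q (c :: cs) = isSubjekLoop (isSubjekStep q c) cs from by
        simp [isSubjekLoop, hneg]]
      rw [ih (isSubjekStep q c) (step_mem q c hq)]
      by_cases hsp : c = ' ' ∧ rstripF cs = []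
      · obtain ⟨hc, hr⟩ := hsp
        subst hc
        rw [show rstripF (' ' :: cs) = [] from by rw [rstripF, if_pos ⟨rfl, hr⟩], hr]
        exact (lang_space q hq).symm
      · rw [show rstripF (c :: cs) = c :: rstripF cs from by rw [rstripF, if_neg hsp]]
        exact (lang_step q hq c (rstripF cs) hsp).symm

-- ===== VERDICT (by name: the statement is the Claim_ definition above) =====
theorem isSubjek_spec : Claim_equal_isSubjek := by
  intro word _
  show isSubjek word = isSubjek_alt word
  have h := loop_lang word.toList 0 (by simp [stateList])
  rw [rstripF_eq] at h
  have hl : langOf 0 = isSubjekWords := by simp [langOf]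
  rw [hl] at h
  simp only [isSubjek, isSubjek_alt]
  rw [Bool.eq_iff_iff]
  simp only [Bool.or_eq_true, beq_iff_eq, decide_eq_true_eq]
  exact h
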